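-- pv_equiv track=rewrite | github.com/felix-antonio-sl/kora | scripts/kora_lib/validation.py | split_tool_sections
-- ===== SOURCE A (Python) =====
-- def split_tool_sections(content):
--     sections = {}
--     current_heading = None
--     current_lines = []
--     in_code_block = False
--
--     for line in content.splitlines():
--         stripped = line.strip()
--         if stripped.startswith("```"):
--             in_code_block = not in_code_block
--             continue
--         if not in_code_block and stripped.startswith("## "):
--             if current_heading is not None:
--                 sections[current_heading] = "\n".join(current_lines).strip()
--             current_heading = stripped[3:].strip()
--             current_lines = []
--             continue
--         if current_heading is not None and not in_code_block:
--             current_lines.append(line)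
--
--     if current_heading is not None:
--         sections[current_heading] = "\n".join(current_lines).strip()
--     return sections
-- ===== SOURCE B (Python) =====
-- def split_tool_sections(content):
--     # Pass 1: drop fence lines and everything inside code blocks.
--     visible = []
--     in_code = False
--     for line in content.splitlines():
--         if line.strip().startswith("```"):
--             in_code = not in_code
--         elif not in_code:
--             visible.append(line)
--     # Pass 2: split the remaining lines into sections by '## ' headings.
--     sections = {}
--     heading = None
--     cur = []
--     for line in visible:
--         stripped = line.strip()
--         if stripped.startswith("## "):
--             if heading is not None:
--                 sections[heading] = "\n".join(cur).strip()
--             heading = stripped[3:].strip()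
--             cur = []
--         elif heading is not None:
--             cur.append(line)
--     if heading is not None:
--         sections[heading] = "\n".join(cur).strip()
--     return sections
-- ===== Notes on version B (the rewrite author's own statement) =====
-- stated objective: simpler
-- what changed: Replaces A's single loop carrying four pieces of state (dict, heading, lines, code-block flag) by two independent linear passes: first filter out fence lines and code-block contents, then split the surviving lines into sections with no code-block state.
import Mathlib
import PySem

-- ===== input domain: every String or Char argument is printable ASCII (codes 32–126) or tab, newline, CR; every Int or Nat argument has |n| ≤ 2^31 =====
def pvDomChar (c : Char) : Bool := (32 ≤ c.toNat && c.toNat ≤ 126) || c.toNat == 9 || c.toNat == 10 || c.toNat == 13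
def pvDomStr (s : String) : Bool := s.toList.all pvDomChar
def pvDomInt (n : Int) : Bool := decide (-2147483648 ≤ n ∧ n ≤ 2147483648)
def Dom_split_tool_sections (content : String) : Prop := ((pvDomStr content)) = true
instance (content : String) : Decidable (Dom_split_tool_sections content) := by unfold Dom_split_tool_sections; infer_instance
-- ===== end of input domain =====

-- B restructures A's single four-state loop into two independent passes (code-block filtering, then section splitting); same O(n) cost, simpler state.

-- ===== PORT A =====
-- one loop step of A: state = (sections, current_heading, current_lines, in_code_block)
def pvStepA (st : PySem.Dict String String × Option String × List String × Bool) (line : String) :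
    PySem.Dict String String × Option String × List String × Bool :=
  let stripped := PySem.Str.strip line
  if PySem.Str.startswith stripped "```" then
    (st.1, st.2.1, st.2.2.1, !st.2.2.2)
  else if (!st.2.2.2) && PySem.Str.startswith stripped "## " then
    ((match st.2.1 with
      | some h => st.1.insert h (PySem.Str.strip (PySem.Str.join "\n" st.2.2.1))
      | none => st.1),
     some (PySem.Str.strip (PySem.Str.slice stripped (some 3) none)), [], st.2.2.2)
  else if st.2.1.isSome && (!st.2.2.2) then
    (st.1, st.2.1, st.2.2.1 ++ [line], st.2.2.2)
  else st

-- the final flush of A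
def pvFinishA (st : PySem.Dict String String × Option String × List String × Bool) :
    List (String × String) :=
  (match st.2.1 with
   | some h => st.1.insert h (PySem.Str.strip (PySem.Str.join "\n" st.2.2.1))
   | none => st.1).items

def split_tool_sections (content : String) : List (String × String) :=
  pvFinishA ((PySem.Str.splitlines content).foldl pvStepA (PySem.Dict.empty, none, [], false))

-- ===== PORT B =====
-- sections[heading] = "\n".join(cur).strip()
def pvFlush (sections : PySem.Dict String String) (h : String) (cur : List String) :
    PySem.Dict String String :=
  sections.insert h (PySem.Str.strip (PySem.Str.join "\n" cur))

-- pass 1: drop fence lines and code-block contents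
def pvStepB1 (p : List String × Bool) (line : String) : List String × Bool :=
  if PySem.Str.startswith (PySem.Str.strip line) "```" then (p.1, !p.2)
  else if p.2 then p
  else (p.1 ++ [line], p.2)

def pvVisible (content : String) : List String :=
  ((PySem.Str.splitlines content).foldl pvStepB1 ([], false)).1

-- pass 2: split into sections; state = (sections, heading, cur)
def pvStepB2 (st : PySem.Dict String String × Option String × List String) (line : String) :
    PySem.Dict String String × Option String × List String :=
  let stripped := PySem.Str.strip line
  if PySem.Str.startswith stripped "## " then
    ((match st.2.1 with
      | some h => pvFlush st.1 h st.2.2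
      | none => st.1),
     some (PySem.Str.strip (PySem.Str.slice stripped (some 3) none)), [])
  else if st.2.1.isSome then (st.1, st.2.1, st.2.2 ++ [line])
  else st

def pvFinishB (st : PySem.Dict String String × Option String × List String) :
    List (String × String) :=
  (match st.2.1 with
   | some h => pvFlush st.1 h st.2.2
   | none => st.1).items

def split_tool_sections_alt (content : String) : List (String × String) :=
  pvFinishB ((pvVisible content).foldl pvStepB2 (PySem.Dict.empty, none, []))

-- ===== PRECONDITION & SPEC =====
def Spec_split_tool_sections (content : String) (out : List (String × String)) : Prop := out = split_tool_sections_alt content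
instance (content : String) (out : List (String × String)) : Decidable (Spec_split_tool_sections content out) := by unfold Spec_split_tool_sections; infer_instance

-- ===== CLAIM (what is proved, stated in full; the proofs are below) =====
def Claim_equal_split_tool_sections : Prop := ∀ (content : String), Dom_split_tool_sections content → Spec_split_tool_sections content (split_tool_sections content)

-- ===== LEMMAS AND PROOFS =====

-- the list of lines surviving pass 1, as a recursion (proof-side characterisation)
def pvFiltered : List String → Bool → List String
  | [], _ => []
  | l :: ls, icb =>
    if PySem.Str.startswith (PySem.Str.strip l) "```" then pvFiltered ls (!icb)
    else if icb then pvFiltered ls icb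
    else l :: pvFiltered ls icb

theorem pvPass1_eq (ls : List String) : ∀ (acc : List String) (icb : Bool),
    (ls.foldl pvStepB1 (acc, icb)).1 = acc ++ pvFiltered ls icb := by
  induction ls with
  | nil => intro acc icb; simp [pvFiltered]
  | cons l ls ih =>
    intro acc icb
    simp only [List.foldl_cons, pvStepB1, pvFiltered]
    split_ifs with h1 h2 <;> simp [ih]

def pvDropB (st : PySem.Dict String String × Option String × List String × Bool) :
    PySem.Dict String String × Option String × List String :=
  (st.1, st.2.1, st.2.2.1)

theorem pvMain (ls : List String) :
    ∀ (sec : PySem.Dict String String) (h : Option String) (cur : List String) (icb : Bool),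
    pvDropB (ls.foldl pvStepA (sec, h, cur, icb)) =
      (pvFiltered ls icb).foldl pvStepB2 (sec, h, cur) := by
  induction ls with
  | nil => intro sec h cur icb; rfl
  | cons l ls ih =>
    intro sec h cur icb
    rw [List.foldl_cons]
    by_cases hf : PySem.Chars.startswith (PySem.Chars.strip l.toList) ['`', '`', '`'] = true
    · have hA : pvStepA (sec, h, cur, icb) l = (sec, h, cur, !icb) := by simp [pvStepA, hf]
      have hV : pvFiltered (l :: ls) icb = pvFiltered ls (!icb) := by simp [pvFiltered, hf]
      rw [hA, hV]; exact ih sec h cur (!icb)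
    · cases icb with
      | true =>
        have hA : pvStepA (sec, h, cur, true) l = (sec, h, cur, true) := by simp [pvStepA, hf]
        have hV : pvFiltered (l :: ls) true = pvFiltered ls true := by simp [pvFiltered, hf]
        rw [hA, hV]; exact ih sec h cur true
      | false =>
        have hV : pvFiltered (l :: ls) false = l :: pvFiltered ls false := by
          simp [pvFiltered, hf]
        rw [hV, List.foldl_cons]
        by_cases hh : PySem.Chars.startswith (PySem.Chars.strip l.toList) ['#', '#', ' '] = true
        · cases h with
          | some hd =>
            have hA : pvStepA (sec, some hd, cur, false) l =
                (sec.insert hd (PySem.Str.strip (PySem.Str.join "\n" cur)),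
                 some (PySem.Str.strip (PySem.Str.slice (PySem.Str.strip l) (some 3) none)),
                 [], false) := by simp [pvStepA, hf, hh]
            have hB : pvStepB2 (sec, some hd, cur) l =
                (sec.insert hd (PySem.Str.strip (PySem.Str.join "\n" cur)),
                 some (PySem.Str.strip (PySem.Str.slice (PySem.Str.strip l) (some 3) none)),
                 []) := by simp [pvStepB2, pvFlush, hh]
            rw [hA, hB]; exact ih _ _ _ false
          | none =>
            have hA : pvStepA (sec, none, cur, false) l =
                (sec, some (PySem.Str.strip (PySem.Str.slice (PySem.Str.strip l) (some 3) none)),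
                 [], false) := by simp [pvStepA, hf, hh]
            have hB : pvStepB2 (sec, none, cur) l =
                (sec, some (PySem.Str.strip (PySem.Str.slice (PySem.Str.strip l) (some 3) none)),
                 []) := by simp [pvStepB2, hh]
            rw [hA, hB]; exact ih _ _ _ false
        · cases h with
          | some hd =>
            have hA : pvStepA (sec, some hd, cur, false) l = (sec, some hd, cur ++ [l], false) := by
              simp [pvStepA, hf, hh]
            have hB : pvStepB2 (sec, some hd, cur) l = (sec, some hd, cur ++ [l]) := by
              simp [pvStepB2, hh]
            rw [hA, hB]; exact ih _ _ _ false
          | none =>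
            have hA : pvStepA (sec, none, cur, false) l = (sec, none, cur, false) := by
              simp [pvStepA, hf, hh]
            have hB : pvStepB2 (sec, none, cur) l = (sec, none, cur) := by
              simp [pvStepB2, hh]
            rw [hA, hB]; exact ih _ _ _ false

theorem pvFinish_eq (st : PySem.Dict String String × Option String × List String × Bool) :
    pvFinishA st = pvFinishB (pvDropB st) := by
  cases st with
  | mk sec rest => rfl

-- ===== VERDICT (by name: the statement is the Claim_ definition above) =====
theorem split_tool_sections_spec : Claim_equal_split_tool_sections := by
  intro content _
  unfold Spec_split_tool_sections split_tool_sections split_tool_sections_alt pvVisible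
  rw [pvFinish_eq, pvMain, pvPass1_eq]
  simp
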